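-- pv_equiv track=rewrite | github.com/spencerhcindia/code-with-friends | 2024-06-26/built-ins.py | letter_finder
-- ===== SOURCE A (Python) =====
-- from collections import defaultdict, Counter, deque
--
-- def letter_finder(string: str) -> str | None:
--
--     letters = dict(Counter(string)) # this is a dict with key letter and value num of occurrences
--
--     maximum = max(letters.values()) # this is the highest number of all the values in the above dict
--
--     if dict(Counter(letters.values()))[maximum] > 1:
--         return None
--     else:
--         for element, value in letters.items():
--             if value == maximum:
--                 return element
-- ===== SOURCE B (Python) =====
-- def letter_finder(string: str) -> str | None:
--     # sort-then-run-scan: one pass over the sorted characters; ties and the winner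
--     # fall out of the run lengths (no Counter, no dict, no frequency histogram)
--     best, best_len, tie = None, 0, False
--     s = sorted(string)
--     i, n = 0, len(s)
--     while i < n:
--         j = i
--         while j < n and s[j] == s[i]:
--             j += 1
--         run = j - i
--         if run > best_len:
--             best, best_len, tie = s[i], run, False
--         elif run == best_len:
--             tie = True
--         i = j
--     return None if tie else best
-- ===== Notes on version B (the rewrite author's own statement) =====
-- stated objective: alternative
-- what changed: Replaces A's Counter dict plus histogram-of-frequencies tie test and find-first loop by sort-then-run-scan: sort the characters, then one pass over the sorted list tracking the best run length and a tie flag (no dict, no counting structure).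
import Mathlib
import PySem

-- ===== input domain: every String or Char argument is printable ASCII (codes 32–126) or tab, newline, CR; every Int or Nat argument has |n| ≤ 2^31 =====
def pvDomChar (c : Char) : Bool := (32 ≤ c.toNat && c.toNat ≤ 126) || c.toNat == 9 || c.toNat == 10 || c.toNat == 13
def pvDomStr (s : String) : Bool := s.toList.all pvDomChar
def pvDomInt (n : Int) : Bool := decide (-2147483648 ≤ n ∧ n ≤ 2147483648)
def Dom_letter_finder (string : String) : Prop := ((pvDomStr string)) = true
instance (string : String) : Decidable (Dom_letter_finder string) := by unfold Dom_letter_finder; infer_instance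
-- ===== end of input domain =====

-- B replaces A's Counter dict + histogram-of-frequencies tie test by sort-then-run-scan (alternative algorithm, same results).

-- ===== PORT A =====
def letter_finder (string : String) : Option String :=
  let letters := PySem.Dict.counter string.toList
  match PySem.List.max? letters.values (fun v => v) with
  | none => none
  | some maximum =>
    match (PySem.Dict.counter letters.values).get? maximum with
    | none => none
    | some n =>
      if n > 1 then none
      else
        match letters.items.find? (fun p => p.2 == maximum) with
        | none => none
        | some p => some (String.ofList [p.1])

-- ===== PORT B =====
-- the while loop of Source B: consume one run of equal characters per step, tracking (best, best_len, tie)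
def pvScan : List Char → Option Char → Int → Bool → Option Char × Int × Bool
  | [], best, bestLen, tie => (best, bestLen, tie)
  | c :: rest, best, bestLen, tie =>
    let run : Int := 1 + (rest.takeWhile (· == c)).length
    let rest' := rest.dropWhile (· == c)
    if run > bestLen then pvScan rest' (some c) run false
    else if run == bestLen then pvScan rest' best bestLen true
    else pvScan rest' best bestLen tie
termination_by l => l.length
decreasing_by all_goals
  exact Nat.lt_succ_of_le (List.length_dropWhile_le _ _)

def letter_finder_alt (string : String) : Option String :=
  let s := PySem.List.sorted string.toList (fun c => c) false
  match pvScan s none 0 false with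
  | (best, _, tie) => if tie then none else best.map (fun c => String.ofList [c])

-- ===== PRECONDITION & SPEC =====
-- Pre_ excludes only the empty string, on which A raises ValueError from max() on an empty sequence.
def Pre_letter_finder (string : String) : Prop := string ≠ ""
instance (string : String) : Decidable (Pre_letter_finder string) := by unfold Pre_letter_finder; infer_instance
def pvWitness_letter_finder : String := "aab"

def Spec_letter_finder (string : String) (out : Option String) : Prop := out = letter_finder_alt string
instance (string : String) (out : Option String) : Decidable (Spec_letter_finder string out) := by unfold Spec_letter_finder; infer_instance

-- ===== CLAIM (what is proved, stated in full; the proofs are below) =====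
def Claim_equal_letter_finder : Prop := ∀ (string : String), Dom_letter_finder string → Pre_letter_finder string → Spec_letter_finder string (letter_finder string)

-- ===== LEMMAS AND PROOFS =====

-- common model: the unique character (from the candidate list D) of maximal count, none on a tie
def pvModel (f : Char → Int) (D : List Char) : Option Char :=
  match PySem.List.max? (D.map f) (fun v => v) with
  | none => none
  | some M =>
    match D.filter (fun c => f c == M) with
    | [w] => some w
    | _ => none

-- runs of the character list, as the scan consumes them
def pvRuns : List Char → List (Char × Int)
  | [] => []
  | c :: rest => (c, (1 + (rest.takeWhile (· == c)).length : Int)) :: pvRuns (rest.dropWhile (· == c))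
termination_by l => l.length
decreasing_by exact Nat.lt_succ_of_le (List.length_dropWhile_le _ _)

-- the scan, abstracted over the run list
def pvScanPairs : List (Char × Int) → Option Char → Int → Bool → Option Char × Int × Bool
  | [], b, m, t => (b, m, t)
  | (c, v) :: rest, b, m, t =>
    if v > m then pvScanPairs rest (some c) v false
    else if v == m then pvScanPairs rest b m true
    else pvScanPairs rest b m t

lemma scan_eq_scanPairs (l : List Char) (b : Option Char) (m : Int) (t : Bool) :
    pvScan l b m t = pvScanPairs (pvRuns l) b m t := by
  induction hn : l.length using Nat.strong_induction_on generalizing l b m t with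
  | _ n ih =>
    match l with
    | [] => simp [pvScan, pvRuns, pvScanPairs]
    | c :: rest =>
      have hlt : (rest.dropWhile (· == c)).length < n := by
        subst hn; exact Nat.lt_succ_of_le (List.length_dropWhile_le _ _)
      rw [pvScan, pvRuns]
      simp only [pvScanPairs]
      split_ifs <;> exact ih _ hlt _ _ _ _ rfl

lemma scanPairs_gen (ps : List (Char × Int)) (b : Char) (m : Int) (t : Bool)
    (hm : 0 < m) (hv : ∀ p ∈ ps, 0 < p.2) :
    pvScanPairs ps (some b) m t =
      ((if (ps.map Prod.snd).foldl max m = m then some b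
        else (ps.find? (fun p => p.2 == (ps.map Prod.snd).foldl max m)).map Prod.fst),
       (ps.map Prod.snd).foldl max m,
       (if (ps.map Prod.snd).foldl max m = m
        then t || decide (0 < (ps.map Prod.snd).count ((ps.map Prod.snd).foldl max m))
        else decide (1 < (ps.map Prod.snd).count ((ps.map Prod.snd).foldl max m)))) := by
  induction ps generalizing b m t with
  | nil => simp [pvScanPairs]
  | cons p rest ih =>
    obtain ⟨c, v⟩ := p
    have hv0 : 0 < v := hv (c, v) (by simp)
    have hvr : ∀ q ∈ rest, 0 < q.2 := fun q hq => hv q (by simp [hq])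
    simp only [pvScanPairs, List.map_cons, List.foldl_cons]
    by_cases h1 : v > m
    · rw [if_pos h1, ih c v false hv0 hvr]
      have hmax : max m v = v := by omega
      simp only [hmax]
      have hFv : v ≤ (rest.map Prod.snd).foldl max v :=
        (PySem.List.le_foldl_max (rest.map Prod.snd) v).1
      have hne : ¬ (rest.map Prod.snd).foldl max v = m := by omega
      refine Prod.ext ?_ (Prod.ext rfl ?_)
      · by_cases hF : (rest.map Prod.snd).foldl max v = v
        · simp only [if_pos hF, if_neg hne]
          rw [List.find?_cons_of_pos (by simp [hF])]
          rfl
        · simp only [if_neg hF, if_neg hne]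
          rw [List.find?_cons_of_neg (by simp; omega)]
      · by_cases hF : (rest.map Prod.snd).foldl max v = v
        · simp only [List.count_cons, hF, Bool.false_or]
          simp
          omega
        · simp only [if_neg hF, if_neg hne, List.count_cons]
          have : ¬ v = (rest.map Prod.snd).foldl max v := by omega
          simp [this]
    · rw [if_neg h1]
      have hmax : max m v = m := by omega
      by_cases h2 : (v == m) = true
      · have hveq : v = m := by simpa using h2
        rw [if_pos h2, ih b m true hm hvr]
        simp only [hmax]
        have hFv : m ≤ (rest.map Prod.snd).foldl max m :=
          (PySem.List.le_foldl_max (rest.map Prod.snd) m).1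
        refine Prod.ext ?_ (Prod.ext rfl ?_)
        · by_cases hF : (rest.map Prod.snd).foldl max m = m
          · simp [hF]
          · simp only [if_neg hF]
            rw [List.find?_cons_of_neg (by simp; omega)]
        · by_cases hF : (rest.map Prod.snd).foldl max m = m
          · have : (0 : Nat) < List.count ((rest.map Prod.snd).foldl max m) (v :: rest.map Prod.snd) := by
              rw [List.count_cons]; simp [hF, hveq]
            simp [hF, hveq]
          · simp only [if_neg hF, List.count_cons]
            have : ¬ v = (rest.map Prod.snd).foldl max m := by omega
            simp [this]
      · rw [if_neg h2, ih b m t hm hvr]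
        have hvm : v < m := by simp at h2; omega
        simp only [hmax]
        have hFv : m ≤ (rest.map Prod.snd).foldl max m :=
          (PySem.List.le_foldl_max (rest.map Prod.snd) m).1
        have hvne : ¬ v = (rest.map Prod.snd).foldl max m := by omega
        refine Prod.ext ?_ (Prod.ext rfl ?_)
        · by_cases hF : (rest.map Prod.snd).foldl max m = m
          · simp [hF]
          · simp only [if_neg hF]
            rw [List.find?_cons_of_neg (by simp; omega)]
        · by_cases hF : (rest.map Prod.snd).foldl max m = m <;>
            simp [hF, hvne, hvm.ne]

lemma sorted_run (c : Char) (rest : List Char) (h : (c :: rest).Pairwise (· ≤ ·)) :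
    (rest.takeWhile (· == c)).length = rest.count c ∧ c ∉ rest.dropWhile (· == c) := by
  induction rest with
  | nil => simp
  | cons d r ihr =>
    by_cases hdc : d = c
    · subst hdc
      have this' := ihr h.of_cons
      simp only [List.takeWhile_cons, List.dropWhile_cons, beq_self_eq_true, if_true,
        List.length_cons, List.count_cons]
      refine ⟨by simp [this'.1], this'.2⟩
    · have hcd : c ≤ d := (List.pairwise_cons.mp h).1 d (by simp)
      have hdr : ∀ x ∈ r, d ≤ x := (List.pairwise_cons.mp h.of_cons).1
      have hcr : c ∉ d :: r := by
        intro hmem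
        rcases List.mem_cons.mp hmem with h1 | h1
        · exact hdc h1.symm
        · have := hdr c h1
          exact hdc (le_antisymm this hcd)

      have hbeq : (d == c) = false := by simp [hdc]
      simp only [List.takeWhile_cons, hbeq, List.dropWhile_cons, Bool.false_eq_true, if_false,
        List.length_nil]
      exact ⟨(List.count_eq_zero.mpr hcr).symm, hcr⟩

lemma runs_spec (l : List Char) (h : l.Pairwise (· ≤ ·)) :
    ((pvRuns l).map Prod.fst).Nodup ∧
    (∀ a, a ∈ (pvRuns l).map Prod.fst ↔ a ∈ l) ∧
    (∀ p ∈ pvRuns l, p.2 = (l.count p.1 : Int)) := by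
  induction hn : l.length using Nat.strong_induction_on generalizing l with
  | _ n ih =>
    match l, h with
    | [], _ => simp [pvRuns]
    | c :: rest, h =>
      have hlt : (rest.dropWhile (· == c)).length < n := by
        subst hn; exact Nat.lt_succ_of_le (List.length_dropWhile_le _ _)
      obtain ⟨hlen, hnot⟩ := sorted_run c rest h
      have hds : (rest.dropWhile (· == c)).Pairwise (· ≤ ·) :=
        h.of_cons.sublist (List.dropWhile_sublist _)
      obtain ⟨ihN, ihM, ihC⟩ := ih _ hlt _ hds rfl
      have htake : ∀ x ∈ rest.takeWhile (· == c), x = c := by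
        intro x hx
        simpa using List.mem_takeWhile_imp hx
      have hsplit : rest = rest.takeWhile (· == c) ++ rest.dropWhile (· == c) :=
        (List.takeWhile_append_dropWhile).symm
      have hmemrest : ∀ a, a ≠ c → (a ∈ rest ↔ a ∈ rest.dropWhile (· == c)) := by
        intro a hac
        constructor
        · intro ha
          rw [hsplit] at ha
          rcases List.mem_append.mp ha with h1 | h1
          · exact absurd (htake a h1) hac
          · exact h1
        · intro ha
          exact (List.dropWhile_sublist _).mem ha
      have hcount : ∀ a, a ≠ c → rest.count a = (rest.dropWhile (· == c)).count a := by
        intro a hac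
        conv_lhs => rw [hsplit]
        rw [List.count_append, List.count_eq_zero.mpr (fun hmem => hac (htake a hmem))]
        omega
      rw [pvRuns]
      refine ⟨?_, ?_, ?_⟩
      · simp only [List.map_cons, List.nodup_cons]
        exact ⟨fun hmem => hnot ((ihM c).mp hmem), ihN⟩
      · intro a
        simp only [List.map_cons, List.mem_cons, ihM]
        by_cases hac : a = c
        · simp [hac]
        · simp only [hac, false_or]
          exact (hmemrest a hac).symm
      · intro p hp
        rcases List.mem_cons.mp hp with hp1 | hp1
        · subst hp1
          simp only [List.count_cons, beq_self_eq_true, if_true]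
          rw [← hlen]
          push_cast
          ring
        · have h2 := ihC p hp1
          have hpmem : p.1 ∈ rest.dropWhile (· == c) :=
            (ihM p.1).mp (List.mem_map_of_mem hp1)
          have hpc : p.1 ≠ c := fun he => hnot (he ▸ hpmem)
          rw [h2, List.count_cons, hcount p.1 hpc]
          simp [Ne.symm hpc]

lemma max?_id_perm (l l' : List Int) (h : l.Perm l') :
    PySem.List.max? l (fun v => v) = PySem.List.max? l' (fun v => v) := by
  cases hl : PySem.List.max? l (fun v => v) with
  | none =>
    rw [PySem.List.max?_eq_none_iff _ _] at hl
    subst hl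
    rw [(PySem.List.max?_eq_none_iff _ _).mpr h.nil_eq.symm]
  | some M =>
    cases hl' : PySem.List.max? l' (fun v => v) with
    | none =>
      rw [PySem.List.max?_eq_none_iff _ _] at hl'
      subst hl'
      rw [(PySem.List.max?_eq_none_iff _ _).mpr h.eq_nil] at hl
      exact hl.symm
    | some M' =>
      have h1 : M ≤ M' := PySem.List.max?_isMax hl' M (h.mem_iff.mp (PySem.List.max?_mem hl))
      have h2 : M' ≤ M := PySem.List.max?_isMax hl M' (h.mem_iff.mpr (PySem.List.max?_mem hl'))
      rw [le_antisymm h1 h2]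

lemma model_perm (f : Char → Int) (D D' : List Char) (h : D.Perm D') :
    pvModel f D = pvModel f D' := by
  unfold pvModel
  rw [max?_id_perm (D.map f) (D'.map f) (h.map f)]
  cases PySem.List.max? (D'.map f) (fun v => v) with
  | none => rfl
  | some M =>
    simp only []
    have hp : (D.filter (fun c => f c == M)).Perm (D'.filter (fun c => f c == M)) :=
      h.filter _
    rcases hf : D.filter (fun c => f c == M) with _ | ⟨w, _ | ⟨w2, tl⟩⟩
    · rw [hf] at hp
      rw [← hp.nil_eq]
    · rw [hf] at hp
      rw [List.perm_singleton.mp hp.symm]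
    · rw [hf] at hp
      have hlen : (D'.filter (fun c => f c == M)).length = tl.length + 2 := by
        rw [← hp.length_eq]; simp
      rcases hg : D'.filter (fun c => f c == M) with _ | ⟨y, _ | ⟨y2, t2⟩⟩
      · rfl
      · rw [hg] at hlen; simp at hlen
      · rfl

lemma find?_congr_mem {α : Type} (l : List α) (p q : α → Bool)
    (h : ∀ x ∈ l, p x = q x) : l.find? p = l.find? q := by
  induction l with
  | nil => rfl
  | cons x t ih =>
    rw [List.find?_cons, List.find?_cons, h x (by simp)]
    cases q x <;> simp [ih (fun y hy => h y (by simp [hy]))]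

lemma B_eq_model (s : String) :
    letter_finder_alt s =
      (pvModel (fun c => (s.toList.count c : Int)) (PySem.List.dedup s.toList)).map
        (fun c => String.ofList [c]) := by
  simp only [letter_finder_alt]
  set f : Char → Int := fun c => (s.toList.count c : Int) with hfdef
  set L := PySem.List.sorted s.toList (fun c => c) false with hLdef
  have hLs : L.Pairwise (· ≤ ·) := PySem.List.sorted_pairwise _ _
  have hperm : L.Perm s.toList := PySem.List.sorted_perm _ _ _
  have hcnt : ∀ c, L.count c = s.toList.count c := fun c => hperm.count_eq c
  obtain ⟨hN, hM, hC⟩ := runs_spec L hLs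
  have hC' : ∀ p ∈ pvRuns L, p.2 = f p.1 := by
    intro p hp; rw [hC p hp, hfdef]; simp [hcnt]
  have hDperm : ((pvRuns L).map Prod.fst).Perm (PySem.List.dedup s.toList) := by
    rw [List.perm_ext_iff_of_nodup hN (PySem.List.nodup_dedup _)]
    intro a
    rw [hM a, PySem.List.mem_dedup, hperm.mem_iff]
  rw [← model_perm f _ _ hDperm]
  rw [scan_eq_scanPairs]
  rcases hr : pvRuns L with _ | ⟨⟨c, v⟩, rps⟩
  · simp [pvScanPairs, pvModel]; rfl
  · simp only [List.map_cons]
    have hmemc : c ∈ L := (hM c).mp (by rw [hr]; simp)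
    have hcv : v = f c := hC' (c, v) (by rw [hr]; simp)
    have hv0 : 0 < v := by
      rw [hcv]
      show (0:Int) < (List.count c s.toList : Int)
      exact_mod_cast List.count_pos_iff.mpr (hperm.mem_iff.mp hmemc)
    have hvr : ∀ p ∈ rps, 0 < p.2 := by
      intro p hp
      have hpM : p ∈ pvRuns L := by rw [hr]; simp [hp]
      rw [hC' p hpM]
      have hpL : p.1 ∈ L := (hM p.1).mp (List.mem_map_of_mem hpM)
      show (0:Int) < (List.count p.1 s.toList : Int)
      exact_mod_cast List.count_pos_iff.mpr (hperm.mem_iff.mp hpL)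
    have hstep : pvScanPairs ((c, v) :: rps) none 0 false = pvScanPairs rps (some c) v false := by
      simp [pvScanPairs, hv0]
    rw [hstep, scanPairs_gen rps c v false hv0 hvr]
    have hvals : (c :: rps.map Prod.fst).map f = v :: rps.map Prod.snd := by
      simp only [List.map_cons, List.map_map, ← hcv]
      congr 1
      exact (List.map_congr_left (fun p hp => (hC' p (by rw [hr]; simp [hp])).symm))
    simp only [pvModel, hvals, PySem.List.max?_id_cons]
    set F := (rps.map Prod.snd).foldl max v with hFdef
    have hflt : ((c :: rps.map Prod.fst).filter (fun a => f a == F)).length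
        = (v :: rps.map Prod.snd).count F := by
      rw [← hvals, List.count, List.countP_map, List.countP_eq_length_filter]
      rfl
    have hFv : v ≤ F := (PySem.List.le_foldl_max (rps.map Prod.snd) v).1
    have hFmem : F ∈ v :: rps.map Prod.snd := by
      rcases PySem.List.foldl_max_mem (rps.map Prod.snd) v with h | h
      · rw [hFdef, h]; exact List.mem_cons_self
      · exact List.mem_cons_of_mem _ h
    have hcnt1 : 0 < (v :: rps.map Prod.snd).count F := List.count_pos_iff.mpr hFmem
    have hcc : (v :: rps.map Prod.snd).count F = (rps.map Prod.snd).count F + (if v = F then 1 else 0) := by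
      simp [List.count_cons]
    by_cases htie : 1 < (v :: rps.map Prod.snd).count F
    · -- tie: both sides none
      have htie' : (if F = v then false || decide (0 < (rps.map Prod.snd).count F)
          else decide (1 < (rps.map Prod.snd).count F)) = true := by
        by_cases hF : F = v
        · rw [hcc, if_pos hF.symm] at htie
          rw [if_pos hF]
          simp only [Bool.false_or, decide_eq_true_eq]
          omega
        · rw [hcc, if_neg (fun he => hF he.symm)] at htie
          rw [if_neg hF]
          simp only [decide_eq_true_eq]
          omega
      rw [htie']
      simp only [if_pos]
      have hlen2 : 2 ≤ ((c :: rps.map Prod.fst).filter (fun a => f a == F)).length := by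
        rw [hflt]; omega
      rcases hfl : (c :: rps.map Prod.fst).filter (fun a => f a == F) with _ | ⟨y, _ | ⟨y2, t2⟩⟩
      · rw [hfl] at hlen2; simp at hlen2
      · rw [hfl] at hlen2; simp at hlen2
      · rfl
    · -- unique winner
      have hcnt : (v :: rps.map Prod.snd).count F = 1 := by omega
      have htie' : (if F = v then false || decide (0 < (rps.map Prod.snd).count F)
          else decide (1 < (rps.map Prod.snd).count F)) = false := by
        by_cases hF : F = v
        · rw [hcc, if_pos hF.symm] at hcnt
          rw [if_pos hF]
          simp only [Bool.false_or, decide_eq_false_iff_not]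
          omega
        · rw [hcc, if_neg (fun he => hF he.symm)] at hcnt
          rw [if_neg hF]
          simp only [decide_eq_false_iff_not]
          omega
      rw [htie']
      simp only [Bool.false_eq_true, if_false]
      obtain ⟨w, hw⟩ := List.length_eq_one_iff.mp (hflt.trans hcnt)
      rw [hw]
      have hfind : (c :: rps.map Prod.fst).find? (fun a => f a == F) = some w := by
        rw [← List.head?_filter, hw]; rfl
      by_cases hF : F = v
      · rw [if_pos hF]
        rw [List.find?_cons_of_pos (by simp [← hcv, hF])] at hfind
        simp only [Option.some.injEq] at hfind
        rw [hfind]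
      · rw [if_neg hF]
        rw [List.find?_cons_of_neg (by simp [← hcv]; exact fun he => hF he.symm)] at hfind
        rw [List.find?_map] at hfind
        have hcong : rps.find? ((fun a => f a == F) ∘ Prod.fst) = rps.find? (fun p => p.2 == F) :=
          find?_congr_mem rps _ _ (fun p hp => by
            simp only [Function.comp]
            rw [← hC' p (by rw [hr]; simp [hp])])
        rw [hcong] at hfind
        rw [hfind]

lemma counter_values_eq (cs : List Char) :
    (PySem.Dict.counter cs).values = (PySem.List.dedup cs).map (fun c => (cs.count c : Int)) := by
  simp [PySem.Dict.values, PySem.Dict.items_counter, List.map_map, PySem.List.dedup_eq_ofList]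

lemma A_eq_model (s : String) :
    letter_finder s =
      (pvModel (fun c => (s.toList.count c : Int)) (PySem.List.dedup s.toList)).map
        (fun c => String.ofList [c]) := by
  simp only [letter_finder, pvModel]
  rw [counter_values_eq]
  set D := PySem.List.dedup s.toList with hD
  set f : Char → Int := fun c => (s.toList.count c : Int) with hf
  cases hmax : PySem.List.max? (D.map f) (fun v => v) with
  | none => simp
  | some M =>
    simp only []
    have hMmem : M ∈ D.map f := PySem.List.max?_mem hmax
    have hcount : (D.map f).count M = (D.filter (fun c => f c == M)).length := by
      rw [List.count, List.countP_map, List.countP_eq_length_filter]; rfl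
    have hpos : 0 < (D.map f).count M := List.count_pos_iff.mpr hMmem
    have hget : (PySem.Dict.counter (D.map f)).get? M = some (((D.map f).count M : Int)) := by
      have hgd := PySem.Dict.getD_counter (xs := D.map f) (v := M)
      cases hq : (PySem.Dict.counter (D.map f)).get? M with
      | none =>
        have := PySem.Dict.getD_of_get?_eq_none _ (d0 := (0:Int)) hq
        rw [this] at hgd; omega
      | some n =>
        have := PySem.Dict.getD_of_get?_eq_some _ (d0 := (0:Int)) hq
        rw [this] at hgd; rw [hgd]
    rw [hget]
    simp only []
    by_cases h1 : 1 < (D.map f).count M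
    · have : ((D.map f).count M : Int) > 1 := by exact_mod_cast h1
      rw [if_pos this]
      have hlen : 1 < (D.filter (fun c => f c == M)).length := by rw [← hcount]; omega
      rcases hflt : D.filter (fun c => f c == M) with _ | ⟨a, _ | ⟨b, t⟩⟩
      · rfl
      · rw [hflt] at hlen; simp at hlen
      · rfl
    · have hc1 : (D.map f).count M = 1 := by omega
      have : ¬ (((D.map f).count M : Int) > 1) := by exact_mod_cast h1
      rw [if_neg this]
      obtain ⟨w, hw⟩ := List.length_eq_one_iff.mp (by rw [← hcount]; exact hc1)
      rw [hw]
      have hfind : (PySem.Dict.counter s.toList).items.find? (fun p => p.2 == M)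
          = some (w, f w) := by
        rw [PySem.Dict.items_counter, ← PySem.List.dedup_eq_ofList, ← hD]
        rw [List.find?_map]
        have : D.find? ((fun p : Char × Int => p.2 == M) ∘ (fun k => (k, (s.toList.count k : Int))))
            = D.find? (fun c => f c == M) := rfl
        rw [this, ← List.head?_filter, hw]
        rfl
      rw [hfind]
      rfl

-- ===== VERDICT (by name: the statements are the Claim_ definitions above) =====
theorem letter_finder_spec : Claim_equal_letter_finder := by
  intro s _ _
  unfold Spec_letter_finder
  rw [A_eq_model, B_eq_model]
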